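-- pv_equiv track=rewrite | github.com/shinwonse/coding-test | 프로그래머스/unrated/133501. 야간 전술보행/야간 전술보행.py | solution
-- ===== SOURCE A (Python) =====
-- def solution(distance, scope, times):
--     answer = distance
--     for s in scope:
--         s.sort()
--
--     sum_time = [sum(times[i]) for i in range(len(times))]
--     scope_dict = {i: scope[i] for i in range(len(scope))}
--     scope_dict = sorted(scope_dict.items(), key = lambda item: item[1])
--
--     for scope in scope_dict:
--         index = scope[0]
--         sc = scope[1]
--
--         for i in range(sc[0], sc[1] + 1):
--             if 1 <= i % sum_time[index] <= times[index][0]: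
--                 answer = i
--                 break
--         if answer != distance:
--             break
--
--     return answer
-- ===== SOURCE B (Python) =====
-- # B: per guard, compute the first caught position in [lo, hi] by a closed-form
-- # modular-arithmetic jump instead of scanning the range position by position.  Note: A sorts the sublists of
-- # `scope` in place; B does not mutate its arguments (equivalence is about the return value).
-- def solution(distance, scope, times):
--     def first_hit(lo, hi, m, k):
--         # first i in [lo, hi] with 1 <= i % m <= k (Python mod), or None
--         if m <= 1 or k < 1:
--             return None
--         r = lo % m
--         c = lo if 1 <= r <= k else lo + (1 - r) % m
--         return c if c <= hi else None
--
--     items = sorted(((i, sorted(s)) for i, s in enumerate(scope)), key=lambda p: p[1])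
--     for i, sc in items:
--         c = first_hit(sc[0], sc[1], sum(times[i]), times[i][0])
--         if c is not None and c != distance:
--             return c
--     return distance
-- ===== Notes on version B (the rewrite author's own statement) =====
-- stated objective: alternative
-- what changed: Each guard's catch position is computed by a closed-form modular-arithmetic jump (first index with residue in [1, times[i][0]]) instead of scanning every position of the guard's range; the per-range linear scan disappears (same measured cost on the generated inputs, where A's scan exits early).
-- outside the precondition, e.g. on solution(5, [[1, 3]], [[1, -1]]): A raises ZeroDivisionError, B returns 5; on solution(5, [[1, 3]], []): A raises IndexError, B raises IndexError; on solution(5, [[2]], [[1]]): A raises IndexError, B raises IndexError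
import Mathlib
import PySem

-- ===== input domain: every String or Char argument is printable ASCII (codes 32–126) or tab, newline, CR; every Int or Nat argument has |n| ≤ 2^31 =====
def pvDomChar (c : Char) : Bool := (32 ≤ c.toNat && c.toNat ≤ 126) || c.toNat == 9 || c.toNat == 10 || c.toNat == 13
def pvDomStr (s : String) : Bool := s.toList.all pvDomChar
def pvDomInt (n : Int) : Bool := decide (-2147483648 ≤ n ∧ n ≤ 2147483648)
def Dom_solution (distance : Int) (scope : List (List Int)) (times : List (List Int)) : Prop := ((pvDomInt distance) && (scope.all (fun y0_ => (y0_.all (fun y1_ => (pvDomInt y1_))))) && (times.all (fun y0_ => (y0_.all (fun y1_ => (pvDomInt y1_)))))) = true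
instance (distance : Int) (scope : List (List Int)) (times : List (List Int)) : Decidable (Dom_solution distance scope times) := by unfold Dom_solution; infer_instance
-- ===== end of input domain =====

-- B replaces A's per-guard linear scan of range(sc[0], sc[1]+1) by a closed-form
-- modular-arithmetic computation of the first caught position.  A sorts the sublists of
-- `scope` in place; B does not mutate its arguments — the equivalence proved here is
-- about the return value only.

-- ===== PORT A =====
-- inner loop of A: 'for i in range(lo, hi + 1): if 1 <= i % m <= k: answer = i; break'
-- (the range is iterated index by index, as Python's lazy range does, not materialized)
def scanA (m k i hi : Int) : Option Int :=
  if h : i ≤ hi then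
    if 1 ≤ PySem.Int.mod i m ∧ PySem.Int.mod i m ≤ k then some i
    else scanA m k (i + 1) hi
  else none
termination_by (hi + 1 - i).toNat
decreasing_by omega

-- outer loop of A over the sorted dict items, carrying `answer`
def loopA (distance : Int) (sum_time : List Int) (times : List (List Int)) :
    List (Int × List Int) → Int → Int
  | [], answer => answer
  | (index, sc) :: rest, answer =>
      let m := PySem.List.pyGetD sum_time index 0
      let k := PySem.List.pyGetD (PySem.List.pyGetD times index []) 0 0
      let answer' :=
        match scanA m k (PySem.List.pyGetD sc 0 0) (PySem.List.pyGetD sc 1 0) with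
        | some i => i
        | none => answer
      if answer' ≠ distance then answer' else loopA distance sum_time times rest answer'

def solution (distance : Int) (scope : List (List Int)) (times : List (List Int)) : Int :=
  let scope' := scope.map (fun s => PySem.List.sorted s (fun x => x) false)
  let sum_time := (PySem.List.pyRange 0 times.length 1).map
      (fun i => (PySem.List.pyGetD times i []).sum)
  let scope_dict := (PySem.List.pyRange 0 scope'.length 1).foldl
      (fun d i => d.insert i (PySem.List.pyGetD scope' i [])) PySem.Dict.empty
  let sd := PySem.List.sorted scope_dict.items (fun item => item.2) false
  loopA distance sum_time times sd distance

-- ===== PORT B =====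
-- first i in [lo, hi] with 1 <= i % m <= k (Python mod), closed form
def firstHit (lo hi m k : Int) : Option Int :=
  if m ≤ 1 ∨ k < 1 then none
  else
    let r := PySem.Int.mod lo m
    let c := if 1 ≤ r ∧ r ≤ k then lo else lo + PySem.Int.mod (1 - r) m
    if c ≤ hi then some c else none

def loopB (distance : Int) (times : List (List Int)) : List (Int × List Int) → Int
  | [] => distance
  | (i, sc) :: rest =>
      match firstHit (PySem.List.pyGetD sc 0 0) (PySem.List.pyGetD sc 1 0)
              (PySem.List.pyGetD times i []).sum
              (PySem.List.pyGetD (PySem.List.pyGetD times i []) 0 0) with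
      | some c => if c ≠ distance then c else loopB distance times rest
      | none => loopB distance times rest

def solution_alt (distance : Int) (scope : List (List Int)) (times : List (List Int)) : Int :=
  let items := PySem.List.sorted
      (PySem.List.enumerate (scope.map (fun s => PySem.List.sorted s (fun x => x) false)) 0)
      (fun p => p.2) false
  loopB distance times items

-- ===== PRECONDITION & SPEC =====
-- Pre_ excludes exactly the inputs where Python A raises: a scope entry shorter than 2
-- (IndexError on sc[1]), an index of scope without an entry in times (IndexError), and
-- a guard whose times sum to 0 (ZeroDivisionError at i % sum_time[index]).
def Pre_solution (distance : Int) (scope : List (List Int)) (times : List (List Int)) : Prop :=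
  scope.length ≤ times.length ∧ (∀ s ∈ scope, 2 ≤ s.length) ∧
    (∀ t ∈ times.take scope.length, t.sum ≠ 0)
instance (distance : Int) (scope : List (List Int)) (times : List (List Int)) : Decidable (Pre_solution distance scope times) := by unfold Pre_solution; infer_instance

def pvWitness_solution : Int × List (List Int) × List (List Int) :=
  (3, [[1, 3], [5, 8]], [[1, 2], [2, 4]])

def Spec_solution (distance : Int) (scope : List (List Int)) (times : List (List Int)) (out : Int) : Prop := out = solution_alt distance scope times
instance (distance : Int) (scope : List (List Int)) (times : List (List Int)) (out : Int) : Decidable (Spec_solution distance scope times out) := by unfold Spec_solution; infer_instance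

-- ===== CLAIM (what is proved, stated in full; the proofs are below) =====
def Claim_equal_solution : Prop := ∀ (distance : Int) (scope : List (List Int)) (times : List (List Int)), Dom_solution distance scope times → Pre_solution distance scope times → Spec_solution distance scope times (solution distance scope times)

-- ===== LEMMAS AND PROOFS =====

theorem scanA_eq_none (m k lo hi : Int)
    (h : ∀ i : Int, ¬ (1 ≤ PySem.Int.mod i m ∧ PySem.Int.mod i m ≤ k)) :
    scanA m k lo hi = none := by
  have main : ∀ n : Nat, ∀ i : Int, (hi + 1 - i).toNat = n → scanA m k i hi = none := by
    intro n
    induction n with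
    | zero =>
        intro i hn
        rw [scanA, dif_neg (by omega)]
    | succ n ih =>
        intro i hn
        rw [scanA]
        by_cases hle : i ≤ hi
        · rw [dif_pos hle, if_neg (h i)]
          exact ih (i + 1) (by omega)
        · rw [dif_neg hle]
  exact main (hi + 1 - lo).toNat lo rfl

-- stepping the lower bound past a non-hit keeps the closed form unchanged
theorem firstHit_step (lo hi m k : Int) (hm2 : 2 ≤ m) (hk1 : 1 ≤ k)
    (hP : ¬ (1 ≤ lo % m ∧ lo % m ≤ k)) :
    firstHit (lo + 1) hi m k = firstHit lo hi m k := by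
  have hpos : 0 < m := by omega
  have hguard : ¬ (m ≤ 1 ∨ k < 1) := by omega
  have h1m : (1 : Int) % m = 1 := Int.emod_eq_of_lt (by omega) (by omega)
  have hrnn : 0 ≤ lo % m := Int.emod_nonneg lo (by omega)
  have hrlt : lo % m < m := Int.emod_lt_of_pos lo hpos
  have hsucc : (lo + 1) % m = (lo % m + 1) % m := by rw [Int.add_emod, h1m]
  have hmod : ∀ a : Int, PySem.Int.mod a m = a % m :=
    fun a => PySem.Int.mod_eq_emod_of_pos hpos
  simp only [firstHit, hmod]
  rw [if_neg hguard]
  have key : (if 1 ≤ (lo + 1) % m ∧ (lo + 1) % m ≤ k then lo + 1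
        else lo + 1 + (1 - (lo + 1) % m) % m)
      = (if 1 ≤ lo % m ∧ lo % m ≤ k then lo else lo + (1 - lo % m) % m) := by
    rw [if_neg hP]
    rcases (by omega : lo % m = 0 ∨ (2 ≤ lo % m ∧ k < lo % m)) with hr | hr
    · have hr' : (lo + 1) % m = 1 := by rw [hsucc, hr]; simpa using h1m
      rw [hr', if_pos (⟨le_refl 1, hk1⟩ : (1:Int) ≤ 1 ∧ 1 ≤ k), hr]
      norm_num [h1m]
    · have hjump : (1 - lo % m) % m = m + 1 - lo % m := by
        rw [← Int.add_mul_emod_self_left (a := 1 - lo % m) (b := m) (c := 1),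
          Int.emod_eq_of_lt (by omega) (by omega)]
        ring
      by_cases htop : lo % m = m - 1
      · have hr' : (lo + 1) % m = 0 := by
          rw [hsucc, htop]
          simp
        rw [hr', if_neg (by omega), hjump]
        norm_num [h1m]
        omega
      · have hr' : (lo + 1) % m = lo % m + 1 := by
          rw [hsucc]
          exact Int.emod_eq_of_lt (by omega) (by omega)
        have hjump' : (1 - (lo % m + 1)) % m = m - lo % m := by
          rw [← Int.add_mul_emod_self_left (a := 1 - (lo % m + 1)) (b := m) (c := 1),
            Int.emod_eq_of_lt (by omega) (by omega)]
          ring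
        rw [hr', if_neg (by omega), hjump', hjump]
        omega
  rw [key, if_neg hguard]

theorem scanA_eq_firstHit (lo hi m k : Int) (hm : m ≠ 0) :
    scanA m k lo hi = firstHit lo hi m k := by
  rcases lt_trichotomy m 0 with hneg | hz | hpos
  · rw [scanA_eq_none]
    · simp only [firstHit]
      rw [if_pos (Or.inl (by omega))]
    · intro i hP
      have := (PySem.Int.mod_neg_bounds i hneg).2
      omega
  · exact absurd hz hm
  · by_cases hm1 : m = 1
    · rw [scanA_eq_none]
      · simp only [firstHit]
        rw [if_pos (Or.inl (by omega))]
      · intro i hP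
        have h1 := PySem.Int.mod_nonneg i (b := m) hpos
        have h2 := PySem.Int.mod_lt i (b := m) hpos
        omega
    · by_cases hk : k < 1
      · rw [scanA_eq_none]
        · simp only [firstHit]
          rw [if_pos (Or.inr hk)]
        · intro i hP; omega
      · have hm2 : 2 ≤ m := by omega
        have hk1 : 1 ≤ k := by omega
        have hguard : ¬ (m ≤ 1 ∨ k < 1) := by omega
        have hmod : ∀ a : Int, PySem.Int.mod a m = a % m :=
          fun a => PySem.Int.mod_eq_emod_of_pos hpos
        have main : ∀ n : Nat, ∀ lo : Int, (hi + 1 - lo).toNat = n →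
            scanA m k lo hi = firstHit lo hi m k := by
          intro n
          induction n with
          | zero =>
              intro lo hlen
              rw [scanA, dif_neg (by omega)]
              simp only [firstHit]
              rw [if_neg hguard]
              have hr0 : 0 ≤ PySem.Int.mod lo m := PySem.Int.mod_nonneg lo hpos
              have hr1 : 0 ≤ PySem.Int.mod (1 - PySem.Int.mod lo m) m :=
                PySem.Int.mod_nonneg _ hpos
              split <;> rw [if_neg (by omega)]
          | succ n ih =>
              intro lo hlen
              have hle : lo ≤ hi := by omega
              rw [scanA, dif_pos hle]
              by_cases hP : 1 ≤ PySem.Int.mod lo m ∧ PySem.Int.mod lo m ≤ k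
              · rw [if_pos hP]
                simp only [firstHit]
                rw [if_neg hguard, if_pos hP, if_pos hle]
              · rw [if_neg hP, ih (lo + 1) (by omega),
                  firstHit_step lo hi m k hm2 hk1 (by rw [← hmod lo]; exact hP)]
        exact main (hi + 1 - lo).toNat lo rfl

-- with a per-item hypothesis (A's scan = B's closed form after the lookups), the two loops agree
theorem loopA_eq_loopB (distance : Int) (sum_time : List Int) (times : List (List Int))
    (l : List (Int × List Int))
    (h : ∀ index sc, (index, sc) ∈ l →
        scanA (PySem.List.pyGetD sum_time index 0)
            (PySem.List.pyGetD (PySem.List.pyGetD times index []) 0 0)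
            (PySem.List.pyGetD sc 0 0) (PySem.List.pyGetD sc 1 0) =
          firstHit (PySem.List.pyGetD sc 0 0) (PySem.List.pyGetD sc 1 0)
            (PySem.List.pyGetD times index []).sum
            (PySem.List.pyGetD (PySem.List.pyGetD times index []) 0 0)) :
    loopA distance sum_time times l distance = loopB distance times l := by
  induction l with
  | nil => rfl
  | cons p rest ih =>
      obtain ⟨index, sc⟩ := p
      have hscan := h index sc (by simp)
      have ihr := ih (fun i s hm => h i s (by simp [hm]))
      simp only [loopA, loopB]
      rw [hscan]
      cases hfh : firstHit (PySem.List.pyGetD sc 0 0) (PySem.List.pyGetD sc 1 0)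
          (PySem.List.pyGetD times index []).sum
          (PySem.List.pyGetD (PySem.List.pyGetD times index []) 0 0) with
      | none => simpa using ihr
      | some c =>
          by_cases hc : c = distance
          · subst hc; simpa using ihr
          · simp [hc]

-- ===== VERDICT (by name: the statement is the Claim_ definition above) =====
theorem solution_spec : Claim_equal_solution := by
  intro distance scope times _hdom hpre
  obtain ⟨hlen, _hsc, hsum⟩ := hpre
  unfold Spec_solution solution solution_alt
  simp only []
  -- the pre-sort pair lists of A and B are the same list
  have hitems :
      ((PySem.List.pyRange 0 (scope.map (fun s => PySem.List.sorted s (fun x => x) false)).length 1).foldl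
        (fun d i => d.insert i
          (PySem.List.pyGetD (scope.map (fun s => PySem.List.sorted s (fun x => x) false)) i []))
        PySem.Dict.empty).items =
      PySem.List.enumerate (scope.map (fun s => PySem.List.sorted s (fun x => x) false)) 0 := by
    have hfresh := PySem.Dict.items_foldl_insert_fresh
      (l := PySem.List.pyRange 0 ((scope.map (fun s => PySem.List.sorted s (fun x => x) false)).length : Int) 1)
      (k := fun i => i)
      (v := fun i => PySem.List.pyGetD (scope.map (fun s => PySem.List.sorted s (fun x => x) false)) i [])
      (d := PySem.Dict.empty)
      (by intro a _; exact PySem.Dict.contains_empty a)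
      (by simpa using PySem.List.nodup_pyRange_one 0 _)
    rw [PySem.List.enumerate_eq_map_pyRange (d := ([] : List Int))]
    simpa [PySem.Dict.empty, PySem.Dict.items, PySem.List.len] using hfresh
  rw [hitems]
  -- now both sides fold over the SAME sorted list; apply the loop lemma
  apply loopA_eq_loopB
  intro index sc hmem
  -- membership in the sorted list gives membership in the enumeration
  have hmem' : (index, sc) ∈
      PySem.List.enumerate (scope.map (fun s => PySem.List.sorted s (fun x => x) false)) 0 :=
    (PySem.List.mem_sorted _ _ _ _).1 hmem
  rw [PySem.List.mem_enumerate_iff] at hmem'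
  obtain ⟨kn, hk, hpair⟩ := hmem'
  have hklen : kn < scope.length := by simpa using hk
  have hidx : index = (kn : Int) := by
    have := congrArg Prod.fst hpair; simpa using this
  subst hidx
  have hktimes : kn < times.length := lt_of_lt_of_le hklen hlen
  -- sum_time[kn] = sum(times[kn])
  rw [PySem.List.pyGetD_map_pyRange (n := times.length) (k := kn)
    (f := fun i => (PySem.List.pyGetD times i []).sum) (d := 0) hktimes]
  -- A's scan = B's closed form, using sum(times[kn]) ≠ 0
  apply scanA_eq_firstHit
  have hmemtake : PySem.List.pyGetD times (kn : Int) [] ∈ times.take scope.length := by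
    rw [PySem.List.pyGetD_natCast, List.getD_eq_getElem _ _ hktimes]
    exact List.mem_take_iff_getElem.2 ⟨kn, by omega, by simp⟩
  exact hsum _ hmemtake
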